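-- pv_equiv track=rewrite | github.com/jdelarubia/adventjs_dev | 12advent.py | calculate_price_while
-- ===== SOURCE A (Python) =====
-- def calculate_price_while(ornaments: str) -> int:
--     prices = {"*": 1, "o": 5, "^": 10, "#": 50, "@": 100}
--     total_value = 0
--     i = 0
--     while i < len(ornaments):
--         current_ornament = ornaments[i]
--         if current_ornament not in prices.keys():
--             return None  #! undefined
--         current_value = prices.get(current_ornament, 0)
--         if i > 0:
--             prev_ornament = ornaments[i - 1]
--             prev_value = prices.get(prev_ornament, 0)
--             if prev_value < current_value:
--                 total_value -= prev_value * 2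
--         total_value += current_value
--         i += 1
--     return total_value
-- ===== SOURCE B (Python) =====
-- def calculate_price_while(ornaments: str) -> int:
--     prices = {"*": 1, "o": 5, "^": 10, "#": 50, "@": 100}
--     total = 0
--     nxt = None  # value of the ornament to the right of the current one
--     for c in reversed(ornaments):
--         if c not in prices:
--             return None  #! undefined
--         v = prices[c]
--         # Roman-numeral-style signed sum: a value smaller than its right
--         # neighbour counts negatively; no look-back, no 2x subtraction.
--         total += -v if nxt is not None and v < nxt else v
--         nxt = v
--     return total
-- ===== Notes on version B (the rewrite author's own statement) =====
-- stated objective: alternative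
-- what changed: Replaces A's forward index loop, which looks back at the previous character and retroactively subtracts twice its value when it precedes a larger one, by a single right-to-left traversal computing a Roman-numeral-style signed sum: each value is added negatively when smaller than its right neighbour (carried in an accumulator), positively otherwise; B has no doubling correction at all.
import Mathlib
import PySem

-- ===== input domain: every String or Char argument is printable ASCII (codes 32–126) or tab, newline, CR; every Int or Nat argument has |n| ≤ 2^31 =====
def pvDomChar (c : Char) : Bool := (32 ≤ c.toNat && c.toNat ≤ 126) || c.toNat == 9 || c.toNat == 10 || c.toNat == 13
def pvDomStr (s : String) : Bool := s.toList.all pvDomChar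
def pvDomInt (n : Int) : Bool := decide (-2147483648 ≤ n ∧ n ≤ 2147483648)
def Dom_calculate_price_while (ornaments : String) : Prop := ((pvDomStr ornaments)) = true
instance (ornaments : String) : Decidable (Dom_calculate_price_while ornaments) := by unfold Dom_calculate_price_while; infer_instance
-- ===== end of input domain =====

-- B replaces A's forward look-back loop with 2x subtraction by a right-to-left
-- signed (Roman-numeral-style) sum; same O(n) cost, different algorithm shape.

-- the dict literal both Pythons construct
def pvPrices : PySem.Dict Char Int :=
  PySem.Dict.ofList [('*', 1), ('o', 5), ('^', 10), ('#', 50), ('@', 100)]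

-- ===== PORT A =====
-- the while loop of A, index i over the characters
def pvLoopA (cs : List Char) (i : Nat) (total : Int) : Option Int :=
  if h : i < cs.length then
    let current := cs[i]
    if pvPrices.contains current = false then none   -- `return None`
    else
      let cur := pvPrices.getD current 0             -- prices.get(current, 0)
      let total :=
        if hi : 0 < i then
          let prev := cs[i - 1]'(by omega)
          let pv := pvPrices.getD prev 0             -- prices.get(prev, 0)
          if pv < cur then total - pv * 2 else total
        else total
      pvLoopA cs (i + 1) (total + cur)
  else some total
termination_by cs.length - i

def calculate_price_while (ornaments : String) : Option Int :=
  pvLoopA ornaments.toList 0 0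

-- ===== PORT B =====
-- Source B's loop `for c in reversed(ornaments)` carrying (total, nxt)
def pvLoopB (cs : List Char) (nxt : Option Int) (total : Int) : Option Int :=
  match cs with
  | [] => some total
  | c :: rest =>
    if pvPrices.contains c = false then none        -- `return None`
    else
      let v := pvPrices.getD c 0                    -- prices[c]
      let total := total +
        (match nxt with
         | some n => if v < n then -v else v        -- signed contribution
         | none => v)
      pvLoopB rest (some v) total

def calculate_price_while_alt (ornaments : String) : Option Int :=
  pvLoopB ornaments.toList.reverse none 0

-- ===== PRECONDITION & SPEC =====
def Spec_calculate_price_while (ornaments : String) (out : Option Int) : Prop := out = calculate_price_while_alt ornaments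
instance (ornaments : String) (out : Option Int) : Decidable (Spec_calculate_price_while ornaments out) := by unfold Spec_calculate_price_while; infer_instance

-- ===== CLAIM (what is proved, stated in full; the proofs are below) =====
def Claim_equal_calculate_price_while : Prop := ∀ (ornaments : String), Dom_calculate_price_while ornaments → Spec_calculate_price_while ornaments (calculate_price_while ornaments)

-- ===== LEMMAS AND PROOFS =====

-- A's loop re-expressed structurally: the carried state is the price of the previous
-- character (none at the start).
def pvG (p? : Option Int) (l : List Char) (t : Int) : Option Int :=
  match l with
  | [] => some t
  | c :: rest =>
    if pvPrices.contains c = false then none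
    else
      let cur := pvPrices.getD c 0
      let t := match p? with
        | some p => if p < cur then t - p * 2 else t
        | none => t
      pvG (some cur) rest (t + cur)

-- sum of a with a < b over adjacent pairs, left-to-right
def pvAdj : List Int → Int
  | a :: b :: rest => (if a < b then a else 0) + pvAdj (b :: rest)
  | _ => 0

def pvHead (p? : Option Int) (l : List Char) : Int :=
  match p?, l with
  | some p, c :: _ => if p < pvPrices.getD c 0 then p else 0
  | _, _ => 0

-- the same quantity computed over the REVERSED value list
def pvAdjR : List Int → Int
  | b :: a :: rest => (if a < b then a else 0) + pvAdjR (a :: rest)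
  | _ => 0

def pvHeadR (n? : Option Int) (ws : List Int) : Int :=
  match n?, ws with
  | some n, w :: _ => if w < n then w else 0
  | _, _ => 0

theorem pvLoopA_eq_pvG : ∀ (suf pre : List Char) (t : Int),
    pvLoopA (pre ++ suf) pre.length t
      = pvG (pre.getLast?.map (fun c => pvPrices.getD c 0)) suf t := by
  intro suf
  induction suf with
  | nil =>
    intro pre t
    unfold pvLoopA
    simp [pvG]
  | cons c rest ih =>
    intro pre t
    unfold pvLoopA
    have hlen : pre.length < (pre ++ c :: rest).length := by simp
    rw [dif_pos hlen]
    have hget : (pre ++ c :: rest)[pre.length]'hlen = c := by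
      simp [List.getElem_append_right]
    rw [hget]
    by_cases hc : pvPrices.contains c = false
    · simp [pvG, hc]
    · rw [if_neg hc]
      unfold pvG
      rw [if_neg hc]
      have hrec : ∀ t' : Int,
          pvLoopA (pre ++ c :: rest) (pre.length + 1) t'
            = pvG (some (pvPrices.getD c 0)) rest t' := by
        intro t'
        have h1 : pre ++ c :: rest = (pre ++ [c]) ++ rest := by simp
        have h2 : pre.length + 1 = (pre ++ [c]).length := by simp
        rw [h1, h2, ih (pre ++ [c]) t']
        simp
      cases hpre : pre.getLast? with
      | none =>
        have hnil : pre = [] := List.getLast?_eq_none_iff.mp hpre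
        subst hnil
        simpa using hrec (t + pvPrices.getD c 0)
      | some p =>
        have hne : pre ≠ [] := by
          intro h; subst h; simp at hpre
        have hpos : 0 < pre.length := List.length_pos_iff.mpr hne
        have hprev : (pre ++ c :: rest)[pre.length - 1]'(by omega) = p := by
          rw [List.getElem_append_left (by omega)]
          have := List.getLast?_eq_some_iff.mp hpre
          obtain ⟨ys, hys⟩ := this
          subst hys
          simp [List.getElem_append_right]
        simp only [Option.map_some]
        simp [hpos, hprev, hrec]

theorem pvG_char : ∀ (l : List Char) (p? : Option Int) (t : Int),
    pvG p? l t =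
      if l.any (fun c => !(pvPrices.contains c)) then none
      else some (t + (l.map (fun c => pvPrices.getD c 0)).sum
        - 2 * (pvHead p? l + pvAdj (l.map (fun c => pvPrices.getD c 0)))) := by
  intro l
  induction l with
  | nil => intro p? t; simp [pvG, pvHead, pvAdj]
  | cons c rest ih =>
    intro p? t
    unfold pvG
    by_cases hc : pvPrices.contains c = false
    · simp [hc]
    · rw [if_neg hc]
      rw [ih]
      have hcb : (!pvPrices.contains c) = false := by
        cases h : pvPrices.contains c
        · exact absurd h hc
        · simp
      simp only [List.any_cons, hcb, Bool.false_or, List.map_cons, List.sum_cons]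
      split
      · rfl
      · congr 1
        have hadj : pvAdj (pvPrices.getD c 0 :: rest.map (fun c => pvPrices.getD c 0))
            = pvHead (some (pvPrices.getD c 0)) rest
              + pvAdj (rest.map (fun c => pvPrices.getD c 0)) := by
          cases rest with
          | nil => simp [pvAdj, pvHead]
          | cons d ds => simp [pvAdj, pvHead]
        rw [hadj]
        cases p? with
        | none => simp [pvHead]; ring
        | some p =>
          simp only [pvHead]
          split <;> ring

-- B's loop characterised: closed form over the mapped value list
theorem pvLoopB_char : ∀ (cs : List Char) (n? : Option Int) (t : Int),
    pvLoopB cs n? t =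
      if cs.any (fun c => !(pvPrices.contains c)) then none
      else some (t + (cs.map (fun c => pvPrices.getD c 0)).sum
        - 2 * (pvHeadR n? (cs.map (fun c => pvPrices.getD c 0))
               + pvAdjR (cs.map (fun c => pvPrices.getD c 0)))) := by
  intro cs
  induction cs with
  | nil => intro n? t; simp [pvLoopB, pvHeadR, pvAdjR]
  | cons c rest ih =>
    intro n? t
    unfold pvLoopB
    by_cases hc : pvPrices.contains c = false
    · simp [hc]
    · rw [if_neg hc]
      rw [ih]
      have hcb : (!pvPrices.contains c) = false := by
        cases h : pvPrices.contains c
        · exact absurd h hc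
        · simp
      simp only [List.any_cons, hcb, Bool.false_or, List.map_cons, List.sum_cons]
      split
      · rfl
      · congr 1
        have hadj : pvAdjR (pvPrices.getD c 0 :: rest.map (fun c => pvPrices.getD c 0))
            = pvHeadR (some (pvPrices.getD c 0)) (rest.map (fun c => pvPrices.getD c 0))
              + pvAdjR (rest.map (fun c => pvPrices.getD c 0)) := by
          cases rest with
          | nil => simp [pvAdjR, pvHeadR]
          | cons d ds => simp [pvAdjR, pvHeadR]
        rw [hadj]
        cases n? with
        | none => simp [pvHeadR]; ring
        | some n =>
          simp only [pvHeadR]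
          split <;> ring

theorem pvAdjR_snoc : ∀ (ws : List Int) (v : Int),
    pvAdjR (ws ++ [v]) = pvAdjR ws +
      (match ws.getLast? with
       | some b => if v < b then v else 0
       | none => 0) := by
  intro ws
  induction ws with
  | nil => intro v; simp [pvAdjR]
  | cons b rest ih =>
    intro v
    cases rest with
    | nil => simp [pvAdjR]
    | cons a rs =>
      have h1 : pvAdjR (b :: a :: rs ++ [v])
          = (if a < b then a else 0) + pvAdjR (a :: rs ++ [v]) := rfl
      have h2 : pvAdjR (b :: a :: rs)
          = (if a < b then a else 0) + pvAdjR (a :: rs) := rfl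
      rw [h1, ih v, h2, List.getLast?_cons_cons]
      ring

theorem pvAdjR_reverse : ∀ (vs : List Int), pvAdjR vs.reverse = pvAdj vs := by
  intro vs
  induction vs with
  | nil => simp [pvAdjR, pvAdj]
  | cons v tl ih =>
    rw [List.reverse_cons, pvAdjR_snoc, ih, List.getLast?_reverse]
    cases tl with
    | nil => simp [pvAdj]
    | cons a rs => simp [pvAdj]; ring

-- ===== VERDICT (by name: the statement is the Claim_ definition above) =====
theorem calculate_price_while_spec : Claim_equal_calculate_price_while := by
  intro ornaments _
  unfold Spec_calculate_price_while calculate_price_while calculate_price_while_alt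
  have hA : pvLoopA ornaments.toList 0 0 = pvG none ornaments.toList 0 := by
    have := pvLoopA_eq_pvG ornaments.toList [] 0
    simpa using this
  rw [hA, pvG_char, pvLoopB_char]
  rw [List.any_reverse, List.map_reverse, List.sum_reverse, pvAdjR_reverse]
  simp [pvHead, pvHeadR]
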